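-- pv_equiv track=rewrite | github.com/mariops03/DLX-Assembly | SCRIPT_INICIO.py | find_number_with_max_consecutive_evens
-- ===== SOURCE A (Python) =====
-- def collatz_sequence_max_consecutive_evens(n):
--     consecutive_evens = 0
--     max_consecutive_evens = 0
--     while n != 1:
--         if n % 2 == 0:
--             consecutive_evens += 1
--             n = n // 2
--         else:
--             break  # Salimos del bucle si encontramos un número impar
--     max_consecutive_evens = consecutive_evens
--     return max_consecutive_evens
--
-- def find_number_with_max_consecutive_evens(start, end):
--     max_length = 0
--     number_with_max_length = 0
--     for i in range(start, end + 1):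
--         current_length = collatz_sequence_max_consecutive_evens(i)
--         if current_length > max_length:
--             max_length = current_length
--             number_with_max_length = i
--     return number_with_max_length, max_length
-- ===== SOURCE B (Python) =====
-- def find_number_with_max_consecutive_evens(start, end):
--     # Closed-form by powers of two: the winner is the smallest multiple of the
--     # largest power 2^L that has a multiple in [start, end] (O(log) vs A's scan).
--     if start > end:
--         return 0, 0
--     bound = max(abs(start), abs(end)).bit_length()
--     L, pL = 0, 1
--     k, p = 0, 1
--     for _ in range(bound):
--         k += 1
--         p *= 2
--         if -((-start) // p) * p <= end:
--             L, pL = k, p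
--     if L == 0:
--         return 0, 0
--     return -((-start) // pL) * pL, L
-- ===== Notes on version B (the rewrite author's own statement) =====
-- stated objective: faster
-- what changed: Instead of scanning every integer in [start,end] and counting its trailing halvings, B finds the largest k such that a multiple of 2^k lies in the range (via ceiling division, one test per bit) and returns the smallest such multiple, which is the unique maximiser.
import Mathlib
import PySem

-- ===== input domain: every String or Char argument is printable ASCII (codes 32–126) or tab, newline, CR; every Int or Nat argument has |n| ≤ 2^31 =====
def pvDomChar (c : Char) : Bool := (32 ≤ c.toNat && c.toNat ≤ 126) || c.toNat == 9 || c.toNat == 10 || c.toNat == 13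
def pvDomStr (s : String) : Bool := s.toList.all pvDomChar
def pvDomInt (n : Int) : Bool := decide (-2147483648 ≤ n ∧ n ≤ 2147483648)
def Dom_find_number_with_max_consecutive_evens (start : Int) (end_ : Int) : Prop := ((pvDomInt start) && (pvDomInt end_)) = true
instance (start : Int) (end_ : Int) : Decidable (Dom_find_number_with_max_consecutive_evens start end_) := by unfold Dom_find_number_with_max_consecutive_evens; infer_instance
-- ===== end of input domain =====

-- B replaces A's per-element scan by an O(log)-step search for the largest power of two
-- with a multiple in the range; equivalence of return values is claimed on all ranges
-- not containing 0 (on those A's helper loops forever, see Pre_ below).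


-- ===== PORT A =====
-- helper: while n != 1: if n % 2 == 0: count += 1; n //= 2 else: break
-- The 'if h0 : n = 0' branch is a totality guard only: at n = 0 the Python loop never
-- terminates (0 // 2 == 0); such inputs are excluded by Pre_ below.
def pvCollatzEvens (n : Int) : Int :=
  if n = 1 then 0
  else if PySem.Int.mod n 2 = 0 then
    if h0 : n = 0 then 0
    else pvCollatzEvens (PySem.Int.floordiv n 2) + 1
  else 0
termination_by n.natAbs
decreasing_by
  rename_i h1 hmod
  have hd : (2 : Int) ∣ n := (PySem.Int.mod_eq_zero_iff_dvd n 2).mp hmod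
  obtain ⟨m, hm⟩ := hd
  have h2 : PySem.Int.floordiv n 2 = n / 2 := PySem.Int.floordiv_eq_ediv_of_pos (by omega)
  rw [h2, hm]
  rw [Int.mul_ediv_cancel_left m (by omega)]
  omega

def find_number_with_max_consecutive_evens (start : Int) (end_ : Int) : List Int :=
  let st := (PySem.List.pyRange start (end_ + 1) 1).foldl
    (fun (st : Int × Int) i =>
      let c := pvCollatzEvens i
      if c > st.1 then (c, i) else st)
    (0, 0)
  [st.2, st.1]

-- ===== PORT B =====
-- -((-a) // p) * p : smallest multiple of p that is ≥ a (ceiling division), p > 0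
def pvCeilMul (p a : Int) : Int := -(PySem.Int.floordiv (-a) p) * p

def find_number_with_max_consecutive_evens_alt (start : Int) (end_ : Int) : List Int :=
  if start > end_ then [0, 0]
  else
    -- bound = max(abs(start), abs(end)).bit_length()  (Nat.size = Python int.bit_length)
    let bound := Nat.size (max start.natAbs end_.natAbs)
    let st := (List.range bound).foldl
      (fun (st : (Int × Int) × (Int × Int)) _ =>
        let k := st.2.1 + 1
        let p := st.2.2 * 2
        if pvCeilMul p start ≤ end_ then ((k, p), (k, p)) else (st.1, (k, p)))
      ((0, 1), (0, 1))
    if st.1.1 = 0 then [0, 0]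
    else [pvCeilMul st.1.2 start, st.1.1]

-- ===== PRECONDITION & SPEC =====
-- Pre_ excludes exactly the ranges containing 0: there A's helper reaches n = 0 and
-- loops forever (0 // 2 == 0), so A never returns a value.
def Pre_find_number_with_max_consecutive_evens (start : Int) (end_ : Int) : Prop :=
  ¬ (start ≤ 0 ∧ 0 ≤ end_)
instance (start : Int) (end_ : Int) : Decidable (Pre_find_number_with_max_consecutive_evens start end_) := by unfold Pre_find_number_with_max_consecutive_evens; infer_instance

def pvWitness_find_number_with_max_consecutive_evens : Int × Int := (1, 8)

def Spec_find_number_with_max_consecutive_evens (start : Int) (end_ : Int) (out : List Int) : Prop := out = find_number_with_max_consecutive_evens_alt start end_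
instance (start : Int) (end_ : Int) (out : List Int) : Decidable (Spec_find_number_with_max_consecutive_evens start end_ out) := by unfold Spec_find_number_with_max_consecutive_evens; infer_instance

-- ===== CLAIM (what is proved, stated in full; the proofs are below) =====
def Claim_equal_find_number_with_max_consecutive_evens : Prop := ∀ (start : Int) (end_ : Int), Dom_find_number_with_max_consecutive_evens start end_ → Pre_find_number_with_max_consecutive_evens start end_ → Spec_find_number_with_max_consecutive_evens start end_ (find_number_with_max_consecutive_evens start end_)

-- ===== LEMMAS AND PROOFS =====

theorem pvCeilMul_spec (p a : Int) (hp : 0 < p) :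
    a ≤ pvCeilMul p a ∧ pvCeilMul p a < a + p ∧ p ∣ pvCeilMul p a := by
  have h := (PySem.Int.neg_floordiv_neg_eq_iff_of_pos (a := a) (b := p)
      (q := -(PySem.Int.floordiv (-a) p)) hp).mp rfl
  unfold pvCeilMul
  refine ⟨?_, ?_, dvd_mul_left p _⟩ <;> nlinarith [h.1, h.2]

theorem pvCeilMul_le (p a x : Int) (hp : 0 < p) (hd : p ∣ x) (hx : a ≤ x) :
    pvCeilMul p a ≤ x := by
  have h := (PySem.Int.neg_floordiv_neg_eq_iff_of_pos (a := a) (b := p)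
      (q := -(PySem.Int.floordiv (-a) p)) hp).mp rfl
  obtain ⟨y, rfl⟩ := hd
  unfold pvCeilMul
  have hcy : -(PySem.Int.floordiv (-a) p) ≤ y := by nlinarith [h.1, h.2]
  calc -(PySem.Int.floordiv (-a) p) * p ≤ y * p := by nlinarith
    _ = p * y := by ring

theorem exMul_iff (start end_ p : Int) (hp : 0 < p) :
    pvCeilMul p start ≤ end_ ↔ ∃ x, start ≤ x ∧ x ≤ end_ ∧ p ∣ x := by
  constructor
  · intro h
    exact ⟨pvCeilMul p start, (pvCeilMul_spec p start hp).1, h, (pvCeilMul_spec p start hp).2.2⟩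
  · rintro ⟨x, h1, h2, h3⟩
    exact le_trans (pvCeilMul_le p start x hp h3 h1) h2

-- valuation facts about A's helper
theorem pvCollatzEvens_one : pvCollatzEvens 1 = 0 := by rw [pvCollatzEvens]; simp

theorem pvCollatzEvens_of_odd (n : Int) (h : ¬ (2:Int) ∣ n) : pvCollatzEvens n = 0 := by
  have hmod : ¬ PySem.Int.mod n 2 = 0 := fun hc => h ((PySem.Int.mod_eq_zero_iff_dvd n 2).mp hc)
  rw [pvCollatzEvens]
  rcases eq_or_ne n 1 with h1 | h1
  · simp [h1]
  · rw [if_neg h1, if_neg hmod]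

theorem pvCollatzEvens_even (m : Int) (hm : m ≠ 0) :
    pvCollatzEvens (2 * m) = pvCollatzEvens m + 1 := by
  have hmod : PySem.Int.mod (2*m) 2 = 0 := (PySem.Int.mod_eq_zero_iff_dvd _ 2).mpr ⟨m, rfl⟩
  have hfd : PySem.Int.floordiv (2*m) 2 = m := by
    rw [PySem.Int.floordiv_eq_ediv_of_pos (by omega), Int.mul_ediv_cancel_left m (by omega)]
  rw [pvCollatzEvens, if_neg (by omega), if_pos hmod, dif_neg (by omega : ¬ (2*m) = 0), hfd]

theorem pvCollatzEvens_nonneg (n : Int) : 0 ≤ pvCollatzEvens n := by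
  induction n using pvCollatzEvens.induct with
  | case1 => rw [pvCollatzEvens_one]
  | case2 h1 hmod => rw [pvCollatzEvens]; norm_num
  | case3 n h1 hmod h0 ih =>
      rw [pvCollatzEvens, if_neg h1, if_pos hmod, dif_neg h0]; omega
  | case4 n h1 hmod => rw [pvCollatzEvens, if_neg h1, if_neg hmod]

theorem pvCollatzEvens_dvd (n : Int) (hn : n ≠ 0) :
    (2:Int) ^ (pvCollatzEvens n).toNat ∣ n ∧ ¬ (2:Int) ^ ((pvCollatzEvens n).toNat + 1) ∣ n := by
  induction n using pvCollatzEvens.induct with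
  | case1 => rw [pvCollatzEvens_one]; norm_num
  | case2 h1 hmod => exact absurd rfl hn
  | case3 n h1 hmod h0 ih =>
      have hd : (2 : Int) ∣ n := (PySem.Int.mod_eq_zero_iff_dvd n 2).mp hmod
      obtain ⟨m, hm⟩ := hd
      have hfd : PySem.Int.floordiv n 2 = m := by
        rw [PySem.Int.floordiv_eq_ediv_of_pos (by omega), hm, Int.mul_ediv_cancel_left m (by omega)]
      have hm0 : m ≠ 0 := by omega
      obtain ⟨ihd, ihnd⟩ := by rw [hfd] at ih; exact ih hm0
      have hnn : 0 ≤ pvCollatzEvens m := pvCollatzEvens_nonneg m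
      have hv : pvCollatzEvens n = pvCollatzEvens m + 1 := by rw [hm]; exact pvCollatzEvens_even m hm0
      have htn : (pvCollatzEvens n).toNat = (pvCollatzEvens m).toNat + 1 := by omega
      rw [htn, hm]
      constructor
      · rw [pow_succ, mul_comm ((2:Int) ^ (pvCollatzEvens m).toNat) 2]
        exact mul_dvd_mul_left 2 ihd
      · intro hc
        apply ihnd
        rw [pow_succ, mul_comm ((2:Int) ^ ((pvCollatzEvens m).toNat + 1)) 2] at hc
        exact (mul_dvd_mul_iff_left (by norm_num : (2:Int) ≠ 0)).mp hc
  | case4 n h1 hmod =>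
      have h2 : ¬ (2:Int) ∣ n := fun hc => hmod ((PySem.Int.mod_eq_zero_iff_dvd n 2).mpr hc)
      rw [pvCollatzEvens_of_odd n h2]
      exact ⟨by norm_num, by simpa using h2⟩

theorem pvCollatzEvens_eq (n : Int) (hn : n ≠ 0) (k : Nat)
    (h1 : (2:Int) ^ k ∣ n) (h2 : ¬ (2:Int) ^ (k+1) ∣ n) : pvCollatzEvens n = (k : Int) := by
  obtain ⟨hd, hnd⟩ := pvCollatzEvens_dvd n hn
  have hnn := pvCollatzEvens_nonneg n
  set t := (pvCollatzEvens n).toNat with ht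
  have : t = k := by
    by_contra hne
    rcases Nat.lt_or_ge t k with hlt | hge
    · exact hnd (dvd_trans (pow_dvd_pow 2 (by omega)) h1)
    · exact h2 (dvd_trans (pow_dvd_pow 2 (by omega)) hd)
  omega
theorem uniq_aux (a b q m m' : Int) (hq : 0 < q)
    (hno : ∀ x, a ≤ x → x ≤ b → ¬ (2*q) ∣ x)
    (hm1 : a ≤ m) (hm2 : m ≤ b) (hm3 : q ∣ m)
    (hm1' : a ≤ m') (hm2' : m' ≤ b) (hm3' : q ∣ m') (hle : m ≤ m') : m = m' := by
  obtain ⟨u, hu⟩ := hm3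
  obtain ⟨u', hu'⟩ := hm3'
  by_contra hne
  have huu : u < u' := by
    have : q * u < q * u' := by omega
    exact lt_of_mul_lt_mul_left this (le_of_lt hq)
  rcases Int.even_or_odd u with he | ho
  · obtain ⟨w, hw⟩ := he
    exact hno m hm1 hm2 ⟨w, by rw [hu, hw]; ring⟩
  · obtain ⟨w, hw⟩ := ho
    have h1 : u + 1 ≤ u' := by omega
    have hx1 : m ≤ q * (u + 1) := by nlinarith
    have hx2 : q * (u + 1) ≤ m' := by nlinarith
    exact hno (q * (u + 1)) (le_trans hm1 hx1) (le_trans hx2 hm2') ⟨w + 1, by rw [hw]; ring⟩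

theorem uniq_mult (a b q m m' : Int) (hq : 0 < q)
    (hno : ∀ x, a ≤ x → x ≤ b → ¬ (2*q) ∣ x)
    (hm1 : a ≤ m) (hm2 : m ≤ b) (hm3 : q ∣ m)
    (hm1' : a ≤ m') (hm2' : m' ≤ b) (hm3' : q ∣ m') : m = m' := by
  rcases le_total m m' with h | h
  · exact uniq_aux a b q m m' hq hno hm1 hm2 hm3 hm1' hm2' hm3' h
  · exact (uniq_aux a b q m' m hq hno hm1' hm2' hm3' hm1 hm2 hm3 h).symm

def pvAInv (seen : List Int) (st : Int × Int) : Prop :=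
  (∀ i ∈ seen, pvCollatzEvens i ≤ st.1) ∧
  ((st.1 = 0 ∧ st.2 = 0) ∨ (st.2 ∈ seen ∧ pvCollatzEvens st.2 = st.1 ∧ 0 < st.1))


theorem pvFoldA (l : List Int) (seen : List Int) (st : Int × Int) (h : pvAInv seen st) :
    pvAInv (seen ++ l) (l.foldl
      (fun (st : Int × Int) i =>
        let c := pvCollatzEvens i
        if c > st.1 then (c, i) else st) st) := by
  induction l generalizing seen st with
  | nil => simpa using h
  | cons a l ih =>
      have step : pvAInv (seen ++ [a])
          (if pvCollatzEvens a > st.1 then (pvCollatzEvens a, a) else st) := by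
        obtain ⟨hall, hcase⟩ := h
        by_cases hgt : pvCollatzEvens a > st.1
        · rw [if_pos hgt]
          constructor
          · intro i hi
            rcases List.mem_append.mp hi with hi | hi
            · exact le_of_lt (lt_of_le_of_lt (hall i hi) hgt)
            · simp at hi; subst hi; exact le_refl _
          · right
            have hst1 : 0 ≤ st.1 := by
              rcases hcase with ⟨h1, _⟩ | ⟨_, h2, h3⟩
              · omega
              · omega
            exact ⟨List.mem_append.mpr (Or.inr (by simp)), rfl, by omega⟩
        · rw [if_neg hgt]
          constructor
          · intro i hi
            rcases List.mem_append.mp hi with hi | hi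
            · exact hall i hi
            · simp at hi; subst hi; omega
          · rcases hcase with h1 | ⟨h1, h2, h3⟩
            · exact Or.inl h1
            · exact Or.inr ⟨List.mem_append.mpr (Or.inl h1), h2, h3⟩
      have := ih (seen ++ [a]) _ step
      simpa [List.append_assoc] using this

def pvBInv (start end_ : Int) (j : Nat) (st : (Int × Int) × (Int × Int)) : Prop :=
  st.2.1 = (j : Int) ∧ st.2.2 = (2:Int) ^ j ∧
  ∃ ln : Nat, ln ≤ j ∧ st.1.1 = (ln : Int) ∧ st.1.2 = (2:Int) ^ ln ∧
    (ln = 0 ∨ pvCeilMul ((2:Int) ^ ln) start ≤ end_) ∧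
    (∀ t : Nat, ln < t → t ≤ j → ¬ pvCeilMul ((2:Int) ^ t) start ≤ end_)


theorem pvFoldB (start end_ : Int) (bound : Nat) :
    pvBInv start end_ bound ((List.range bound).foldl
      (fun (st : (Int × Int) × (Int × Int)) _ =>
        let k := st.2.1 + 1
        let p := st.2.2 * 2
        if pvCeilMul p start ≤ end_ then ((k, p), (k, p)) else (st.1, (k, p)))
      ((0, 1), (0, 1))) := by
  induction bound with
  | zero =>
      refine ⟨by simp, by simp, 0, le_refl 0, by simp, by simp, Or.inl rfl, ?_⟩
      intro t ht1 ht2; omega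
  | succ n ih =>
      rw [List.range_succ, List.foldl_append]
      set st := (List.range n).foldl
        (fun (st : (Int × Int) × (Int × Int)) _ =>
          let k := st.2.1 + 1
          let p := st.2.2 * 2
          if pvCeilMul p start ≤ end_ then ((k, p), (k, p)) else (st.1, (k, p)))
        ((0, 1), (0, 1)) with hst
      obtain ⟨hk, hp, ln, hln, hL, hpL, hex, hmax⟩ := ih
      simp only [List.foldl_cons, List.foldl_nil]
      have hp2 : st.2.2 * 2 = (2:Int) ^ (n + 1) := by rw [hp, pow_succ]
      by_cases hc : pvCeilMul (st.2.2 * 2) start ≤ end_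
      · rw [if_pos hc]
        refine ⟨by rw [hk]; push_cast; ring, by simpa using hp2, n + 1, le_refl _, by rw [hk]; push_cast; ring, by simpa using hp2, ?_, ?_⟩
        · right; rw [← hp2]; exact hc
        · intro t ht1 ht2; omega
      · rw [if_neg hc]
        refine ⟨by rw [hk]; push_cast; ring, by simpa using hp2, ln, by omega, hL, hpL, hex, ?_⟩
        intro t ht1 ht2
        rcases Nat.lt_or_ge t (n+1) with h | h
        · exact hmax t ht1 (by omega)
        · have : t = n + 1 := by omega
          subst this
          rw [← hp2]; exact hc
theorem main_thm : ∀ (start : Int) (end_ : Int), ¬ (start ≤ 0 ∧ 0 ≤ end_) →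
    find_number_with_max_consecutive_evens start end_ = find_number_with_max_consecutive_evens_alt start end_ := by
  intro start end_ hpre
  rw [find_number_with_max_consecutive_evens, find_number_with_max_consecutive_evens_alt]
  by_cases hse : start > end_
  · rw [if_pos hse, PySem.List.pyRange_one_eq_nil (by omega)]
    simp
  · rw [if_neg hse]
    dsimp only
    have hse' : start ≤ end_ := by omega
    have hM1 : start.natAbs ≤ max start.natAbs end_.natAbs := le_max_left _ _
    have hM2 : end_.natAbs ≤ max start.natAbs end_.natAbs := le_max_right _ _
    have hMlt : max start.natAbs end_.natAbs < 2 ^ Nat.size (max start.natAbs end_.natAbs) :=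
      Nat.lt_size_self _
    have hx0 : ∀ x : Int, start ≤ x → x ≤ end_ → x ≠ 0 := by intro x h1 h2; omega
    have hnobig : ∀ t : Nat, Nat.size (max start.natAbs end_.natAbs) ≤ t →
        ¬ pvCeilMul ((2:Int)^t) start ≤ end_ := by
      intro t ht hc
      have hp : (0:Int) < 2^t := by positivity
      obtain ⟨x, hx1, hx2, hx3⟩ := (exMul_iff start end_ _ hp).mp hc
      have hxne := hx0 x hx1 hx2
      have hdvd : (2^t : Nat) ∣ x.natAbs := by
        have h := Int.natAbs_dvd_natAbs.mpr hx3
        simpa using h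
      have hle : 2^t ≤ x.natAbs := Nat.le_of_dvd (by omega) hdvd
      have hpe : 2 ^ Nat.size (max start.natAbs end_.natAbs) ≤ 2^t :=
        Nat.pow_le_pow_right (by norm_num) ht
      omega
    have hB := pvFoldB start end_ (Nat.size (max start.natAbs end_.natAbs))
    obtain ⟨-, -, ln, hln, hL, hpL, hex, hmaxB⟩ := hB
    have hmax : ∀ t : Nat, ln < t → ¬ pvCeilMul ((2:Int)^t) start ≤ end_ := by
      intro t ht
      by_cases h : t ≤ Nat.size (max start.natAbs end_.natAbs)
      · exact hmaxB t ht h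
      · exact hnobig t (by omega)
    have hno : ∀ x, start ≤ x → x ≤ end_ → ¬ (2:Int)^(ln+1) ∣ x := by
      intro x h1 h2 hd
      exact hmax (ln+1) (by omega)
        ((exMul_iff start end_ _ (by positivity)).mpr ⟨x, h1, h2, hd⟩)
    have hA := pvFoldA (PySem.List.pyRange start (end_+1) 1) [] (0,0)
      ⟨by simp, Or.inl ⟨rfl, rfl⟩⟩
    rw [List.nil_append] at hA
    obtain ⟨hall, hcase⟩ := hA
    have hmem : ∀ x : Int, x ∈ PySem.List.pyRange start (end_+1) 1 ↔ start ≤ x ∧ x ≤ end_ := by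
      intro x; rw [PySem.List.mem_pyRange_one]; omega
    rcases Nat.eq_zero_or_pos ln with hln0 | hlnpos
    · subst hln0
      rw [hL]
      rw [if_pos (by norm_num)]
      have hodd : ∀ x : Int, start ≤ x → x ≤ end_ → pvCollatzEvens x = 0 := by
        intro x h1 h2
        refine pvCollatzEvens_of_odd x ?_
        intro hd
        exact hno x h1 h2 (by simpa using hd)
      rcases hcase with ⟨h1, h2⟩ | ⟨hmemA, hv, hpos⟩
      · rw [h2, h1]
      · obtain ⟨ha1, ha2⟩ := (hmem _).mp hmemA
        rw [hodd _ ha1 ha2] at hv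
        omega
    · have hlnne : ¬ ((ln : Int) = 0) := by omega
      rw [hL, if_neg hlnne, hpL]
      have hp : (0:Int) < 2^ln := by positivity
      obtain ⟨hm1, -, hm3⟩ := pvCeilMul_spec ((2:Int)^ln) start hp
      have hexm : pvCeilMul ((2:Int)^ln) start ≤ end_ := by
        rcases hex with h | h
        · omega
        · exact h
      have hmne : pvCeilMul ((2:Int)^ln) start ≠ 0 := hx0 _ hm1 hexm
      have hvm : pvCollatzEvens (pvCeilMul ((2:Int)^ln) start) = (ln : Int) :=
        pvCollatzEvens_eq _ hmne ln hm3 (hno _ hm1 hexm)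
      have hvle : ∀ x : Int, start ≤ x → x ≤ end_ → pvCollatzEvens x ≤ (ln : Int) := by
        intro x h1 h2
        by_contra hgt
        have hgt' : (ln : Int) < pvCollatzEvens x := by omega
        obtain ⟨hd, -⟩ := pvCollatzEvens_dvd x (hx0 x h1 h2)
        have hnn := pvCollatzEvens_nonneg x
        have hln1 : ln + 1 ≤ (pvCollatzEvens x).toNat := by omega
        exact hno x h1 h2 (dvd_trans (pow_dvd_pow 2 hln1) hd)
      -- final A state
      set stA := (PySem.List.pyRange start (end_ + 1) 1).foldl
        (fun (st : Int × Int) i =>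
          let c := pvCollatzEvens i
          if c > st.1 then (c, i) else st)
        (0, 0) with hstA
      have hge : (ln : Int) ≤ stA.1 := by
        have := hall (pvCeilMul ((2:Int)^ln) start) ((hmem _).mpr ⟨hm1, hexm⟩)
        omega
      rcases hcase with ⟨h1, -⟩ | ⟨hmemA, hv, hpos⟩
      · omega
      · obtain ⟨ha1, ha2⟩ := (hmem _).mp hmemA
        have hle := hvle stA.2 ha1 ha2
        have hstA1 : stA.1 = (ln : Int) := by omega
        have hv2 : pvCollatzEvens stA.2 = (ln : Int) := by omega
        obtain ⟨hd2, -⟩ := pvCollatzEvens_dvd stA.2 (hx0 _ ha1 ha2)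
        have ht2 : (pvCollatzEvens stA.2).toNat = ln := by omega
        rw [ht2] at hd2
        have hno' : ∀ x, start ≤ x → x ≤ end_ → ¬ (2 * (2:Int)^ln) ∣ x := by
          intro x h1 h2 hd
          exact hno x h1 h2 (by rw [pow_succ, mul_comm]; exact hd)
        have heq : pvCeilMul ((2:Int)^ln) start = stA.2 :=
          uniq_mult start end_ ((2:Int)^ln) _ _ hp hno' hm1 hexm hm3 ha1 ha2 hd2
        rw [hstA1, heq]

-- ===== VERDICT (by name: the statement is the Claim_ definition above) =====
theorem find_number_with_max_consecutive_evens_spec : Claim_equal_find_number_with_max_consecutive_evens := by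
  intro start end_ _hdom hpre
  unfold Spec_find_number_with_max_consecutive_evens
  exact main_thm start end_ hpre
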